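-- pv_equiv track=rewrite | github.com/SamMJacob/tds-solver | tds_solver/api/views.py | _extract_direct_answer
-- ===== SOURCE A (Python) =====
-- def _extract_direct_answer(answer, question):
--     """Extract just the direct answer value from the LLM response"""
--     lines = answer.split('\n')
--     for line in lines:
--         if "answer" in line.lower() and ":" in line:
--             return line.split(":", 1)[1].strip()
--
--     # If no clear answer format, return the shortest non-empty line
--     non_empty_lines = [line.strip() for line in lines if line.strip()]
--     if non_empty_lines:
--         return min(non_empty_lines, key=len)
--
--     return answer  # Fall back to the full answer if extraction fails
-- ===== SOURCE B (Python) =====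
-- def _extract_direct_answer(answer, question):
--     """One pass: return on the first 'answer:' line, else track the first shortest stripped line."""
--     best = None
--     for line in answer.split('\n'):
--         if "answer" in line.lower() and ":" in line:
--             return line.split(":", 1)[1].strip()
--         s = line.strip()
--         if s and (best is None or len(s) < len(best)):
--             best = s
--     return best if best is not None else answer
-- ===== Notes on version B (the rewrite author's own statement) =====
-- stated objective: alternative
-- what changed: A scans the lines twice (first for an 'answer:' line, then builds a stripped non-empty list and takes min by length); B is a single pass that returns early on a match and otherwise maintains a running first-shortest stripped line with strict-< updates.
import Mathlib
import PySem

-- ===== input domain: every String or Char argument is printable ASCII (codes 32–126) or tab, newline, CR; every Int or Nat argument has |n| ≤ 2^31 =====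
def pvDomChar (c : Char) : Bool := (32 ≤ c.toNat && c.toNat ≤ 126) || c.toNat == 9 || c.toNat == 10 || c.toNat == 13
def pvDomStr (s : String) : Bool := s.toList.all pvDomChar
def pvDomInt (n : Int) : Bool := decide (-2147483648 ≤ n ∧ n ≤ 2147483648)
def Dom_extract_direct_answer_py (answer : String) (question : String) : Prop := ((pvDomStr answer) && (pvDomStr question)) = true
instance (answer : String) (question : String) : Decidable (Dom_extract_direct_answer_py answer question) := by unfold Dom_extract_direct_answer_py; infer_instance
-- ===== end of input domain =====

-- B fuses A's two scans into one pass over the lines: it returns on the first "answer…:" line and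
-- otherwise maintains the running first-shortest stripped line (strict <); same return value everywhere.

-- ===== PORT A =====
-- first loop of A: return the first line containing "answer" (lowercased) and ":", split and stripped
def pvFindAnsA : List String → Option String
  | [] => none
  | l :: rest =>
    if PySem.Str.isIn "answer" (PySem.Str.lower l) && PySem.Str.isIn ":" l then
      some (PySem.Str.strip (((PySem.Str.splitMax? l ":" 1).getD []).getD 1 ""))
    else pvFindAnsA rest

def extract_direct_answer_py (answer : String) (question : String) : String :=
  let lines := (PySem.Str.split? answer "\n").getD []
  match pvFindAnsA lines with
  | some r => r
  | none =>
    let nonEmpty := (lines.map PySem.Str.strip).filter (fun s => s ≠ "")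
    if nonEmpty ≠ [] then
      match PySem.List.min? nonEmpty (fun s => PySem.Str.len s) with
      | some m => m
      | none => answer
    else answer

-- ===== PORT B =====
-- B's single loop: early return on a match, else update the running best (first shortest wins)
def pvLoopB (answer : String) : List String → Option String → String
  | [], best => best.getD answer
  | l :: rest, best =>
    if PySem.Str.isIn "answer" (PySem.Str.lower l) && PySem.Str.isIn ":" l then
      PySem.Str.strip (((PySem.Str.splitMax? l ":" 1).getD []).getD 1 "")
    else
      let s := PySem.Str.strip l
      let best' := if s ≠ "" && (match best with
          | none => true
          | some b => decide (PySem.Str.len s < PySem.Str.len b)) then some s else best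
      pvLoopB answer rest best'

def extract_direct_answer_py_alt (answer : String) (question : String) : String :=
  pvLoopB answer ((PySem.Str.split? answer "\n").getD []) none

-- ===== PRECONDITION & SPEC =====
def Spec_extract_direct_answer_py (answer : String) (question : String) (out : String) : Prop := out = extract_direct_answer_py_alt answer question
instance (answer : String) (question : String) (out : String) : Decidable (Spec_extract_direct_answer_py answer question out) := by unfold Spec_extract_direct_answer_py; infer_instance

-- ===== CLAIM (what is proved, stated in full; the proofs are below) =====
def Claim_equal_extract_direct_answer_py : Prop := ∀ (answer : String) (question : String), Dom_extract_direct_answer_py answer question → Spec_extract_direct_answer_py answer question (extract_direct_answer_py answer question)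

-- ===== LEMMAS AND PROOFS =====

-- min?'s strict-< running fold, restricted to nonempty stripped lines, is B's update step
def pvMinStep (b : Option String) (s : String) : Option String :=
  match b with
  | none => some s
  | some m => if PySem.Str.len s < PySem.Str.len m then some s else some m

lemma min?_eq_foldl (xs : List String) :
    PySem.List.min? xs (fun s => PySem.Str.len s) = xs.foldl pvMinStep none := by
  unfold PySem.List.min?
  congr 1
  funext b s
  cases b <;> rfl

lemma pvLoopB_spec (answer : String) (lines : List String) (b0 : Option String) :
    pvLoopB answer lines b0 =
      match pvFindAnsA lines with
      | some r => r
      | none =>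
        (((lines.map PySem.Str.strip).filter (fun s => s ≠ "")).foldl pvMinStep b0).getD answer := by
  induction lines generalizing b0 with
  | nil => simp [pvLoopB, pvFindAnsA]
  | cons l rest ih =>
    cases hc : (PySem.Str.isIn "answer" (PySem.Str.lower l) && PySem.Str.isIn ":" l) with
    | true => simp only [pvLoopB, pvFindAnsA, hc, if_true]
    | false =>
      simp only [pvLoopB, pvFindAnsA, hc, Bool.false_eq_true, if_false]
      rw [ih]
      have hacc : (if PySem.Str.strip l ≠ "" && (match b0 with
          | none => true
          | some b => decide (PySem.Str.len (PySem.Str.strip l) < PySem.Str.len b))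
            then some (PySem.Str.strip l) else b0)
          = (if PySem.Str.strip l = "" then b0 else pvMinStep b0 (PySem.Str.strip l)) := by
        cases b0 <;> by_cases hs : PySem.Str.strip l = "" <;>
          simp [pvMinStep, hs]
      rw [hacc]
      by_cases hs : PySem.Str.strip l = "" <;> simp [hs]

-- ===== VERDICT (by name: the statement is the Claim_ definition above) =====
theorem extract_direct_answer_py_spec : Claim_equal_extract_direct_answer_py := by
  intro answer question _
  unfold Spec_extract_direct_answer_py extract_direct_answer_py extract_direct_answer_py_alt
  rw [pvLoopB_spec]
  cases hfa : pvFindAnsA ((PySem.Str.split? answer "\n").getD []) with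
  | some r => simp [hfa]
  | none =>
    simp only [hfa]
    rw [min?_eq_foldl]
    cases hne : (((PySem.Str.split? answer "\n").getD []).map PySem.Str.strip).filter (fun s => s ≠ "") with
    | nil => simp
    | cons x xs =>
      simp only [ne_eq, reduceCtorEq, not_false_eq_true, if_true]
      cases hm : (x :: xs).foldl pvMinStep none with
      | none =>
        exfalso
        have : ∀ (ys : List String) (m : String), (ys.foldl pvMinStep (some m)) ≠ none := by
          intro ys
          induction ys with
          | nil => simp
          | cons y t iht => intro m; simp only [List.foldl_cons, pvMinStep]; split <;> exact iht _
        exact this xs x (by simpa [pvMinStep] using hm)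
      | some m => simp
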